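-- pv_equiv track=rewrite | github.com/sjarmak/CodeContextBench_Dashboard | scripts/judge_finetuning/generate_preferences.py | _build_task_index
-- ===== SOURCE A (Python) =====
-- from typing import Any
--
-- def _build_task_index(
--     annotations: list[dict[str, Any]],
--     judge_results: list[dict[str, Any]],
-- ) -> tuple[
--     dict[str, dict[str, str]],
--     dict[str, str],
--     dict[str, str],
-- ]:
--     """Build task output, description, and reference indexes from all sources.
--
--     Returns (task_outputs, task_descriptions, task_references).
--     task_outputs: task_id -> {condition_name: output_text}
--     """
--     task_outputs: dict[str, dict[str, str]] = {}
--     task_descriptions: dict[str, str] = {}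
--     task_references: dict[str, str] = {}
--
--     for result in judge_results:
--         task_id = result.get("task_id", "")
--         if not task_id:
--             continue
--
--         agent_output = result.get("agent_output", "")
--         if agent_output:
--             condition = result.get("condition", result.get("experiment_id", "default"))
--             task_outputs.setdefault(task_id, {})[condition] = agent_output
--
--         desc = result.get("task_description", "")
--         if desc and task_id not in task_descriptions:
--             task_descriptions[task_id] = desc
--
--         ref = result.get("reference_answer", "")
--         if ref and task_id not in task_references:
--             task_references[task_id] = ref
--
--         criteria = result.get("evaluation_criteria", "")
--         if criteria and task_id not in task_descriptions:
--             task_descriptions[task_id] = f"{desc}\n\nCriteria: {criteria}" if desc else criteria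
--
--     return task_outputs, task_descriptions, task_references
-- ===== SOURCE B (Python) =====
-- from typing import Any
--
--
-- def _first_nonempty(pairs) -> dict[str, str]:
--     """First non-empty value wins per key, in iteration order."""
--     d: dict[str, str] = {}
--     for k, v in pairs:
--         if v and k not in d:
--             d[k] = v
--     return d
--
--
-- def _build_task_index(
--     annotations: list[dict[str, Any]],
--     judge_results: list[dict[str, Any]],
-- ) -> tuple[
--     dict[str, dict[str, str]],
--     dict[str, str],
--     dict[str, str],
-- ]:
--     valid = [r for r in judge_results if r.get("task_id", "")]
--
--     task_outputs: dict[str, dict[str, str]] = {}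
--     for r in valid:
--         out = r.get("agent_output", "")
--         if out:
--             cond = r.get("condition", r.get("experiment_id", "default"))
--             task_outputs.setdefault(r["task_id"], {})[cond] = out
--
--     task_descriptions = _first_nonempty(
--         (r["task_id"], r.get("task_description", "") or r.get("evaluation_criteria", ""))
--         for r in valid
--     )
--     task_references = _first_nonempty(
--         (r["task_id"], r.get("reference_answer", "")) for r in valid
--     )
--     return task_outputs, task_descriptions, task_references
-- ===== Notes on version B (the rewrite author's own statement) =====
-- stated objective: simpler
-- what changed: Replaces A's single loop threading three dicts with a filter of the valid results followed by three independent passes (an outputs loop and a shared first-non-empty-wins helper applied to (task_id, desc-or-criteria) and (task_id, reference) pairs), dropping A's unreachable 'desc\n\nCriteria:' combination branch.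
import Mathlib
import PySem

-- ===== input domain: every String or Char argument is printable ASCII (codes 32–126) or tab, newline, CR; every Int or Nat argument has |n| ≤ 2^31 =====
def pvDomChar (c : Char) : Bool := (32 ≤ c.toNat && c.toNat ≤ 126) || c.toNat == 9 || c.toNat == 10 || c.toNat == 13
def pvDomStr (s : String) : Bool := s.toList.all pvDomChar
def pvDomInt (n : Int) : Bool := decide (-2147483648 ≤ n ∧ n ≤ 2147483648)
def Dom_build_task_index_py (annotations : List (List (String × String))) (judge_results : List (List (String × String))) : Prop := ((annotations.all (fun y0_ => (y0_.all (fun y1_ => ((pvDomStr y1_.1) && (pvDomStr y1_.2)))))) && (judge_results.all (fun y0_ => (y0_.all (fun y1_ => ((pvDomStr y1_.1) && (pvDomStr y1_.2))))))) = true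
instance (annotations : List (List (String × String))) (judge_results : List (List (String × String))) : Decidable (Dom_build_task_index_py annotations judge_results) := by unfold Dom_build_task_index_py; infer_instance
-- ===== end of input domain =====

-- B replaces A's single loop by a filter of the valid results followed by three independent
-- passes (outputs; descriptions via a shared first-non-empty-wins helper fed "desc or criteria";
-- references via the same helper), dropping A's unreachable "desc\n\nCriteria: …" combination.
-- Objective: simpler. Return values only (neither version mutates its arguments).

-- ===== PORT A =====
-- state: (task_outputs, task_descriptions, task_references)
def pyAState : Type := PySem.Dict String (PySem.Dict String String) × PySem.Dict String String × PySem.Dict String String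

def pyAStep (st : pyAState) (result : List (String × String)) : pyAState :=
  let r := PySem.Dict.mk result
  let task_id := r.getD "task_id" ""
  if task_id == "" then st
  else
    let task_outputs := st.1
    let task_descriptions := st.2.1
    let task_references := st.2.2
    let agent_output := r.getD "agent_output" ""
    let task_outputs :=
      if agent_output != "" then
        let condition := r.getD "condition" (r.getD "experiment_id" "default")
        -- setdefault(task_id, {})[condition] = agent_output
        task_outputs.modify task_id PySem.Dict.empty (fun d => d.insert condition agent_output)
      else task_outputs
    let desc := r.getD "task_description" ""
    let task_descriptions :=
      if desc != "" && !(task_descriptions.contains task_id) then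
        task_descriptions.insert task_id desc
      else task_descriptions
    let ref := r.getD "reference_answer" ""
    let task_references :=
      if ref != "" && !(task_references.contains task_id) then
        task_references.insert task_id ref
      else task_references
    let criteria := r.getD "evaluation_criteria" ""
    let task_descriptions :=
      if criteria != "" && !(task_descriptions.contains task_id) then
        task_descriptions.insert task_id
          (if desc != "" then desc ++ "\n\nCriteria: " ++ criteria else criteria)
      else task_descriptions
    (task_outputs, task_descriptions, task_references)

def build_task_index_py (annotations : List (List (String × String))) (judge_results : List (List (String × String))) : (List (String × List (String × String))) × (List (String × String)) × (List (String × String)) :=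
  let st := judge_results.foldl pyAStep (PySem.Dict.empty, PySem.Dict.empty, PySem.Dict.empty)
  (st.1.items.map (fun p => (p.1, p.2.items)), st.2.1.items, st.2.2.items)

-- ===== PORT B =====
-- helper _first_nonempty: first non-empty value wins per key
def pyFirstNonempty (pairs : List (String × String)) : PySem.Dict String String :=
  pairs.foldl
    (fun d p => if p.2 != "" && !(d.contains p.1) then d.insert p.1 p.2 else d)
    PySem.Dict.empty

def pyOutStep (task_outputs : PySem.Dict String (PySem.Dict String String))
    (result : List (String × String)) : PySem.Dict String (PySem.Dict String String) :=
  let r := PySem.Dict.mk result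
  let out := r.getD "agent_output" ""
  if out != "" then
    let cond := r.getD "condition" (r.getD "experiment_id" "default")
    task_outputs.modify (r.getD "task_id" "") PySem.Dict.empty (fun d => d.insert cond out)
  else task_outputs

def build_task_index_py_alt (annotations : List (List (String × String))) (judge_results : List (List (String × String))) : (List (String × List (String × String))) × (List (String × String)) × (List (String × String)) :=
  let valid := judge_results.filter (fun result => (PySem.Dict.mk result).getD "task_id" "" != "")
  let task_outputs := valid.foldl pyOutStep PySem.Dict.empty
  let task_descriptions := pyFirstNonempty (valid.map (fun result =>
    let r := PySem.Dict.mk result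
    let d := r.getD "task_description" ""
    (r.getD "task_id" "", if d != "" then d else r.getD "evaluation_criteria" "")))
  let task_references := pyFirstNonempty (valid.map (fun result =>
    let r := PySem.Dict.mk result
    (r.getD "task_id" "", r.getD "reference_answer" "")))
  (task_outputs.items.map (fun p => (p.1, p.2.items)), task_descriptions.items, task_references.items)

-- ===== PRECONDITION & SPEC =====
def Spec_build_task_index_py (annotations : List (List (String × String))) (judge_results : List (List (String × String))) (out : (List (String × List (String × String))) × (List (String × String)) × (List (String × String))) : Prop := out = build_task_index_py_alt annotations judge_results
instance (annotations : List (List (String × String))) (judge_results : List (List (String × String))) (out : (List (String × List (String × String))) × (List (String × String)) × (List (String × String))) : Decidable (Spec_build_task_index_py annotations judge_results out) := by unfold Spec_build_task_index_py; infer_instance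

-- ===== CLAIM (what is proved, stated in full; the proofs are below) =====
def Claim_equal_build_task_index_py : Prop := ∀ (annotations : List (List (String × String))) (judge_results : List (List (String × String))), Dom_build_task_index_py annotations judge_results → Spec_build_task_index_py annotations judge_results (build_task_index_py annotations judge_results)

-- ===== LEMMAS AND PROOFS =====

-- A's per-result guarded component steps (the guard `if not task_id: continue` distributed
-- over the three independent state components)
def pyDescStep (d : PySem.Dict String String) (result : List (String × String)) : PySem.Dict String String :=
  let r := PySem.Dict.mk result
  let task_id := r.getD "task_id" ""
  let desc := r.getD "task_description" ""
  let d := if desc != "" && !(d.contains task_id) then d.insert task_id desc else d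
  let criteria := r.getD "evaluation_criteria" ""
  if criteria != "" && !(d.contains task_id) then
    d.insert task_id (if desc != "" then desc ++ "\n\nCriteria: " ++ criteria else criteria)
  else d

def pyRefStep (d : PySem.Dict String String) (result : List (String × String)) : PySem.Dict String String :=
  let r := PySem.Dict.mk result
  let ref := r.getD "reference_answer" ""
  if ref != "" && !(d.contains (r.getD "task_id" "")) then d.insert (r.getD "task_id" "") ref else d

def pyGuard (result : List (String × String)) : Bool :=
  (PySem.Dict.mk result).getD "task_id" "" != ""

lemma pyAStep_componentwise (st : pyAState) (result : List (String × String)) :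
    pyAStep st result =
      ((if pyGuard result then pyOutStep st.1 result else st.1),
       (if pyGuard result then pyDescStep st.2.1 result else st.2.1),
       (if pyGuard result then pyRefStep st.2.2 result else st.2.2)) := by
  obtain ⟨a, b, c⟩ := st
  simp only [pyAStep, pyOutStep, pyDescStep, pyRefStep, pyGuard]
  by_cases h : (PySem.Dict.mk result).getD "task_id" "" = ""
  · simp [h]
  · simp [h]

lemma foldl_A_split (l : List (List (String × String)))
    (a : PySem.Dict String (PySem.Dict String String)) (b c : PySem.Dict String String) :
    l.foldl (fun (st : pyAState) r =>
        ((if pyGuard r then pyOutStep st.1 r else st.1),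
         (if pyGuard r then pyDescStep st.2.1 r else st.2.1),
         (if pyGuard r then pyRefStep st.2.2 r else st.2.2))) (a, b, c) =
      (l.foldl (fun a r => if pyGuard r then pyOutStep a r else a) a,
       l.foldl (fun b r => if pyGuard r then pyDescStep b r else b) b,
       l.foldl (fun c r => if pyGuard r then pyRefStep c r else c) c) := by
  induction l generalizing a b c with
  | nil => rfl
  | cons x xs ih => simp only [List.foldl_cons, ih]

lemma foldl_filter_guard {α δ : Type} (l : List δ) (p : δ → Bool) (f : α → δ → α) (a : α) :
    l.foldl (fun st r => if p r then f st r else st) a = (l.filter p).foldl f a := by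
  induction l generalizing a with
  | nil => rfl
  | cons x xs ih =>
    by_cases h : p x <;> simp [h, ih]

-- the criteria branch never fires after a desc insertion: per result, A's description
-- update equals B's first-non-empty step fed "desc or criteria"
lemma pyDescStep_eq (d : PySem.Dict String String) (result : List (String × String)) :
    pyDescStep d result =
      (let r := PySem.Dict.mk result
       let tid := r.getD "task_id" ""
       let v := let x := r.getD "task_description" ""
                if x != "" then x else r.getD "evaluation_criteria" ""
       if v != "" && !(d.contains tid) then d.insert tid v else d) := by
  simp only [pyDescStep]
  by_cases hd : (PySem.Dict.mk result).getD "task_description" "" = ""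
  · simp [hd]
  · by_cases hc : (PySem.Dict.mk result).contains ((PySem.Dict.mk result).getD "task_id" "")
    all_goals
      by_cases h2 : d.contains ((PySem.Dict.mk result).getD "task_id" "") <;>
        simp [hd, h2, PySem.Dict.contains_insert_self]

-- ===== VERDICT (by name: the statement is the Claim_ definition above) =====
theorem build_task_index_py_spec : Claim_equal_build_task_index_py := by
  intro annotations judge_results _
  unfold Spec_build_task_index_py build_task_index_py build_task_index_py_alt pyFirstNonempty
  rw [show pyAStep = (fun (st : pyAState) r =>
        ((if pyGuard r then pyOutStep st.1 r else st.1),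
         (if pyGuard r then pyDescStep st.2.1 r else st.2.1),
         (if pyGuard r then pyRefStep st.2.2 r else st.2.2)))
      from funext fun st => funext fun r => pyAStep_componentwise st r]
  rw [foldl_A_split]
  rw [foldl_filter_guard judge_results pyGuard pyOutStep,
      foldl_filter_guard judge_results pyGuard pyDescStep,
      foldl_filter_guard judge_results pyGuard pyRefStep]
  simp only [List.foldl_map]
  refine congrArg₂ Prod.mk rfl (congrArg₂ Prod.mk ?_ ?_)
  · refine congrArg PySem.Dict.items
      (congrArg (fun f => List.foldl f PySem.Dict.empty _) ?_)
    funext d r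
    exact pyDescStep_eq d r
  · refine congrArg PySem.Dict.items
      (congrArg (fun f => List.foldl f PySem.Dict.empty _) ?_)
    funext d r
    simp only [pyRefStep]
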